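-- pv_equiv track=rewrite | github.com/AKleriX/codewars-tasks | Generating Numbers From Prime Factors I/task-solution.py | count_find_num
-- ===== SOURCE A (Python) =====
-- from math import prod
--
-- def count_find_num(primesL, limit):
--     base = prod(primesL)
--     if base > limit:
--         return []
--     stack = [base]
--     seen = {base}
--     count = 0
--     largest = base
--     while stack:
--         x = stack.pop()
--         count += 1
--         if x > largest:
--             largest = x
--         for p in primesL:
--             y = x * p
--             if y <= limit and y not in seen:
--                 seen.add(y)
--                 stack.append(y)
--     return [count, largest]
-- ===== SOURCE B (Python) =====
-- def count_find_num(primesL, limit):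
--     base = 1
--     for p in primesL:
--         base *= p
--     if base > limit:
--         return []
--     primes = sorted(set(primesL))
--     results = set()
--
--     def rec(i, v):
--         if i == len(primes):
--             results.add(v)
--             return
--         cur = v
--         while 0 < cur <= limit:
--             rec(i + 1, cur)
--             cur *= primes[i]
--
--     rec(0, base)
--     return [len(results), max(results)]
-- ===== Notes on version B (the rewrite author's own statement) =====
-- stated objective: alternative
-- what changed: A's worklist search (stack plus a seen-set membership test per candidate) is replaced by a direct depth-first recursion over the distinct primes that multiplies in successive powers of each prime, enumerating the smooth multiples of the base without any stack or visited-set bookkeeping.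
-- outside the precondition, e.g. on count_find_num([1], 5): A returns [1, 1], B does not finish within the time limit; on count_find_num([-5], 3): A returns [1, -5], B raises ValueError
import Mathlib
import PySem

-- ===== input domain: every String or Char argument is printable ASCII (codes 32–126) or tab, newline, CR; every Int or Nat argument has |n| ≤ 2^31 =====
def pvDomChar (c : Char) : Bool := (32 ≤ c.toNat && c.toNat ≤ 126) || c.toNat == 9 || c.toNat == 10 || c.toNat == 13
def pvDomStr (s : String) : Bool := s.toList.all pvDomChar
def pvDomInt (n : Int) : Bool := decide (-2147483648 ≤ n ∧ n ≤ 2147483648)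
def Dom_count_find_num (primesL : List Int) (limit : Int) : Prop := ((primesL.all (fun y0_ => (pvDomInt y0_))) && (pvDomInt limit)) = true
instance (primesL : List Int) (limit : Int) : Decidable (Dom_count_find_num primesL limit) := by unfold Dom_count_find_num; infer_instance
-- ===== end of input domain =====

-- B replaces A's worklist search (stack + seen-set with membership tests) by a direct
-- depth-first recursion over the distinct primes that tries successive powers of each prime.

-- ===== PORT A =====
-- math.prod(primesL)
def pyProd (l : List Int) : Int := l.foldl (· * ·) 1

-- body of 'for p in primesL: y = x*p; if y <= limit and y not in seen: …'; acc = (stack, seen)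
def aStep (limit x : Int) (acc : List Int × PySem.Set Int) (p : Int) : List Int × PySem.Set Int :=
  let y := x * p
  if y ≤ limit ∧ y ∉ acc.2 then (acc.1 ++ [y], PySem.Set.add acc.2 y) else acc

-- 'while stack: x = stack.pop(); …'; the fuel only makes the loop total in Lean
-- (it is proved sufficient on every input admitted by Pre_)
def aLoop (primesL : List Int) (limit : Int) : Nat → List Int → PySem.Set Int → Int → Int → List Int
  | _, [], _, count, largest => [count, largest]
  | 0, _ :: _, _, _, _ => []   -- fuel exhausted: unreachable under Pre_
  | fuel + 1, stack@(_ :: _), seen, count, largest =>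
    match PySem.List.pop? stack with
    | none => []   -- unreachable: stack is nonempty
    | some (x, rest) =>
      let st := primesL.foldl (aStep limit x) (rest, seen)
      aLoop primesL limit fuel st.1 st.2 (count + 1) (if x > largest then x else largest)

def count_find_num (primesL : List Int) (limit : Int) : List Int :=
  let base := pyProd primesL
  if base > limit then []
  else aLoop primesL limit (limit.toNat + 1) [base] (PySem.Set.ofList [base]) 0 base

-- ===== PORT B =====
mutual
-- 'rec(i, v)' of Source B; the list argument is the i-th suffix of primes
def brec (limit : Int) (l : List Int) (v : Int) (res : PySem.Set Int) : PySem.Set Int :=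
  match l with
  | [] => PySem.Set.add res v
  | p :: ps => bloop limit p ps (limit.toNat + 1) v res
termination_by (l.length, 0)

-- the 'while 0 < cur <= limit' loop of rec; the fuel only makes it total in Lean
def bloop (limit p : Int) (ps : List Int) (fuel : Nat) (cur : Int) (res : PySem.Set Int) : PySem.Set Int :=
  match fuel with
  | 0 => res   -- fuel exhausted: unreachable under Pre_
  | fuel' + 1 =>
    if 0 < cur ∧ cur ≤ limit then bloop limit p ps fuel' (cur * p) (brec limit ps cur res)
    else res
termination_by (ps.length, fuel)
end

def count_find_num_alt (primesL : List Int) (limit : Int) : List Int :=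
  let base := primesL.foldl (· * ·) 1
  if base > limit then []
  else
    let primes := PySem.List.sorted (PySem.Set.ofList primesL) (fun x => x)
    let results := brec limit primes base PySem.Set.empty
    -- max(results): results always contains base, so the .getD default is never consulted
    [PySem.Set.len results, (PySem.List.max? results (fun y => y)).getD 0]

-- ===== PRECONDITION & SPEC =====
-- Pre_ excludes the lists containing an entry < 2 on which the base>limit guard does not fire:
-- outside the function's natural domain of prime factors such entries make A's seen-set walk or
-- B's power recursion loop forever (e.g. on ([1], 5) A returns [1, 1] but B never terminates),
-- or make B's positive-power enumeration find nothing and raise ValueError on max() where A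
-- still walks sign-flipped products (e.g. on ([-5], 3) A returns [1, -5]).
def Pre_count_find_num (primesL : List Int) (limit : Int) : Prop :=
  limit < primesL.prod ∨ ∀ p ∈ primesL, 2 ≤ p
instance (primesL : List Int) (limit : Int) : Decidable (Pre_count_find_num primesL limit) := by
  unfold Pre_count_find_num; infer_instance

def pvWitness_count_find_num : List Int × Int := ([2, 3], 20)

def Spec_count_find_num (primesL : List Int) (limit : Int) (out : List Int) : Prop := out = count_find_num_alt primesL limit
instance (primesL : List Int) (limit : Int) (out : List Int) : Decidable (Spec_count_find_num primesL limit out) := by unfold Spec_count_find_num; infer_instance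

-- ===== CLAIM (what is proved, stated in full; the proofs are below) =====
def Claim_equal_count_find_num : Prop := ∀ (primesL : List Int) (limit : Int), Dom_count_find_num primesL limit → Pre_count_find_num primesL limit → Spec_count_find_num primesL limit (count_find_num primesL limit)

-- ===== LEMMAS AND PROOFS =====

-- the numbers reachable from base by repeated multiplication with members of ps
inductive Reach (ps : List Int) (base : Int) : Int → Prop
  | base : Reach ps base base
  | mul {x p : Int} : Reach ps base x → p ∈ ps → Reach ps base (x * p)

-- n is base times a product of powers of the listed primes, exponents chosen left to right
def GenMem : List Int → Int → Int → Prop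
  | [], v, n => n = v
  | p :: ps, v, n => ∃ k : Nat, GenMem ps (v * p ^ k) n

-- ---- arithmetic helpers ----

theorem one_le_foldl_prod {l : List Int} (h : ∀ p ∈ l, 2 ≤ p) :
    ∀ init : Int, 1 ≤ init → 1 ≤ l.foldl (· * ·) init := by
  induction l with
  | nil => intro init h1; simpa using h1
  | cons p ps ih =>
    intro init h1
    have hp : 2 ≤ p := h p (List.mem_cons_self ..)
    exact ih (fun q hq => h q (List.mem_cons_of_mem _ hq)) (init * p) (by nlinarith)

theorem reach_one_le {ps : List Int} {base n : Int} (hp : ∀ p ∈ ps, 2 ≤ p) (hb : 1 ≤ base)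
    (h : Reach ps base n) : 1 ≤ n := by
  induction h with
  | base => exact hb
  | mul hx hmem ih => have := hp _ hmem; nlinarith

-- ---- GenMem lemmas ----

theorem genmem_refl (l : List Int) (v : Int) : GenMem l v v := by
  induction l generalizing v with
  | nil => rfl
  | cons p ps ih => exact ⟨0, by simpa using ih v⟩

theorem genmem_scale {l : List Int} {v x : Int} (c : Int) (h : GenMem l v x) :
    GenMem l (v * c) (x * c) := by
  induction l generalizing v with
  | nil => simp_all [GenMem]
  | cons p ps ih =>
    obtain ⟨k, hk⟩ := h
    exact ⟨k, by have := ih hk; rwa [mul_right_comm] ⟩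

theorem genmem_mul {l : List Int} {v x p : Int} (h : GenMem l v x) (hp : p ∈ l) :
    GenMem l v (x * p) := by
  induction l generalizing v with
  | nil => cases hp
  | cons q ps ih =>
    obtain ⟨k, hk⟩ := h
    rcases List.mem_cons.mp hp with rfl | hp'
    · exact ⟨k + 1, by have := genmem_scale p hk; rwa [pow_succ, ← mul_assoc]⟩
    · exact ⟨k, ih hk hp'⟩

theorem reach_mul_pow {ps : List Int} {base x p : Int} (hx : Reach ps base x) (hp : p ∈ ps)
    (k : Nat) : Reach ps base (x * p ^ k) := by
  induction k with
  | zero => simpa using hx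
  | succ k ih => rw [pow_succ, ← mul_assoc]; exact Reach.mul ih hp

theorem genmem_reach {primesL : List Int} {base : Int} {l : List Int} {v n : Int}
    (h : GenMem l v n) (hsub : ∀ p ∈ l, p ∈ primesL) (hv : Reach primesL base v) :
    Reach primesL base n := by
  induction l generalizing v with
  | nil => exact h ▸ hv
  | cons p ps ih =>
    obtain ⟨k, hk⟩ := h
    exact ih hk (fun q hq => hsub q (List.mem_cons_of_mem _ hq))
      (reach_mul_pow hv (hsub p (List.mem_cons_self ..)) k)

theorem genmem_le {l : List Int} {v n : Int} (h : GenMem l v n) (hl : ∀ p ∈ l, 2 ≤ p)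
    (hv : 1 ≤ v) : v ≤ n ∧ 1 ≤ n := by
  induction l generalizing v with
  | nil => subst h; exact ⟨le_refl _, hv⟩
  | cons p ps ih =>
    obtain ⟨k, hk⟩ := h
    have hp : 2 ≤ p := hl p (List.mem_cons_self ..)
    have hpow : (1 : Int) ≤ p ^ k := one_le_pow₀ (by omega)
    have hv' : 1 ≤ v * p ^ k := by nlinarith
    have := ih hk (fun q hq => hl q (List.mem_cons_of_mem _ hq)) hv'
    exact ⟨by nlinarith [this.1], this.2⟩

-- reach ↔ genmem over any list with the same members
theorem genmem_iff_reach {primesL primes : List Int} {base : Int}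
    (hmem : ∀ p, p ∈ primes ↔ p ∈ primesL) (n : Int) :
    GenMem primes base n ↔ Reach primesL base n := by
  constructor
  · intro h; exact genmem_reach h (fun p hp => (hmem p).mp hp) Reach.base
  · intro h
    induction h with
    | base => exact genmem_refl _ _
    | mul hx hp ih => exact genmem_mul ih ((hmem _).mpr hp)

-- ---- A-side: the inner for-loop ----

theorem aStep_fold (limit x : Int) (l : List Int) :
    ∀ acc : List Int × PySem.Set Int,
      (∀ n, n ∈ (l.foldl (aStep limit x) acc).2 ↔
        n ∈ acc.2 ∨ ∃ p ∈ l, n = x * p ∧ n ≤ limit) ∧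
      (∀ n, n ∈ (l.foldl (aStep limit x) acc).1 ↔
        n ∈ acc.1 ∨ (n ∈ (l.foldl (aStep limit x) acc).2 ∧ n ∉ acc.2)) ∧
      ((∀ n ∈ acc.1, n ∈ acc.2) → acc.1.Nodup → acc.2.Nodup →
        (∀ n ∈ (l.foldl (aStep limit x) acc).1, n ∈ (l.foldl (aStep limit x) acc).2) ∧
          (l.foldl (aStep limit x) acc).1.Nodup ∧ (l.foldl (aStep limit x) acc).2.Nodup) ∧
      ((l.foldl (aStep limit x) acc).1.length + acc.2.length =
        (l.foldl (aStep limit x) acc).2.length + acc.1.length) := by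
  induction l with
  | nil =>
    intro acc
    exact ⟨by simp, by simp, fun h1 h2 h3 => ⟨h1, h2, h3⟩, by rw [List.foldl_nil]; omega⟩
  | cons p ps ih =>
    intro acc
    rw [List.foldl_cons]
    by_cases hc : x * p ≤ limit ∧ x * p ∉ acc.2
    · have h2' : aStep limit x acc p = (acc.1 ++ [x * p], PySem.Set.add acc.2 (x * p)) := by
        simp only [aStep, if_pos hc]
      have h1 : (aStep limit x acc p).1 = acc.1 ++ [x * p] := by rw [h2']
      have h2 : (aStep limit x acc p).2 = acc.2 ++ [x * p] := by
        rw [h2']; exact PySem.Set.add_of_not_mem hc.2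
      obtain ⟨F1, F2, F3, F4⟩ := ih (aStep limit x acc p)
      refine ⟨?_, ?_, ?_, ?_⟩
      · intro n
        rw [F1 n, h2]
        simp only [List.mem_append, List.mem_cons, List.not_mem_nil, or_false]
        constructor
        · rintro ((h | rfl) | ⟨q, hq, rfl, hle⟩)
          · exact Or.inl h
          · exact Or.inr ⟨p, Or.inl rfl, rfl, hc.1⟩
          · exact Or.inr ⟨q, Or.inr hq, rfl, hle⟩
        · rintro (h | ⟨q, hq | hq, rfl, hle⟩)
          · exact Or.inl (Or.inl h)
          · subst hq; exact Or.inl (Or.inr rfl)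
          · exact Or.inr ⟨q, hq, rfl, hle⟩
      · intro n
        have hxpF : x * p ∈ (ps.foldl (aStep limit x) (aStep limit x acc p)).2 :=
          (F1 _).mpr (Or.inl (by rw [h2]; simp))
        rw [F2 n, h1, h2]
        simp only [List.mem_append, List.mem_cons, List.not_mem_nil, or_false]
        constructor
        · rintro ((h | rfl) | ⟨hF, hn⟩)
          · exact Or.inl h
          · exact Or.inr ⟨hxpF, hc.2⟩
          · exact Or.inr ⟨hF, fun h => hn (Or.inl h)⟩
        · rintro (h | ⟨hF, hn⟩)
          · exact Or.inl (Or.inl h)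
          · by_cases hnx : n = x * p
            · exact Or.inl (Or.inr hnx)
            · exact Or.inr ⟨hF, by rintro (h | h); exacts [hn h, hnx h]⟩
      · intro hsub hnd1 hnd2
        apply F3
        · intro n hn
          rw [h1] at hn; rw [h2]
          rcases List.mem_append.mp hn with h | h
          · exact List.mem_append.mpr (Or.inl (hsub n h))
          · exact List.mem_append.mpr (Or.inr h)
        · rw [h1, List.nodup_append]
          refine ⟨hnd1, List.nodup_singleton _, ?_⟩
          intro a ha b hb
          have hb' : b = x * p := by simpa using hb
          subst hb'
          intro hab
          exact hc.2 (hab ▸ hsub _ ha)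
        · rw [h2']; exact PySem.Set.nodup_add _ _ hnd2
      · have l1 : (aStep limit x acc p).1.length = acc.1.length + 1 := by rw [h1]; simp
        have l2 : (aStep limit x acc p).2.length = acc.2.length + 1 := by rw [h2]; simp
        omega
    · have heq : aStep limit x acc p = acc := by simp only [aStep, if_neg hc]
      rw [heq]
      obtain ⟨F1, F2, F3, F4⟩ := ih acc
      refine ⟨?_, F2, F3, F4⟩
      intro n
      rw [F1 n]
      simp only [List.mem_cons]
      constructor
      · rintro (h | ⟨q, hq, rfl, hle⟩)
        · exact Or.inl h
        · exact Or.inr ⟨q, Or.inr hq, rfl, hle⟩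
      · rintro (h | ⟨q, hq | hq, rfl, hle⟩)
        · exact Or.inl h
        · subst hq
          rcases Decidable.em (x * q ∈ acc.2) with hin | hin
          · exact Or.inl hin
          · exact absurd ⟨hle, hin⟩ hc
        · exact Or.inr ⟨q, hq, rfl, hle⟩

-- ---- cardinality bound ----

theorem length_le_toNat {L : List Int} {limit : Int} (hnd : L.Nodup)
    (h : ∀ n ∈ L, 1 ≤ n ∧ n ≤ limit) : L.length ≤ limit.toNat := by
  have hsub : L.toFinset ⊆ Finset.Icc 1 limit := by
    intro n hn
    have := h n (List.mem_toFinset.mp hn)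
    exact Finset.mem_Icc.mpr this
  have hcard := Finset.card_le_card hsub
  rw [List.toFinset_card_of_nodup hnd, Int.card_Icc] at hcard
  simpa using hcard

-- ---- A-side: the while-loop ----

theorem aLoop_spec (primesL : List Int) (limit base : Int)
    (hp : ∀ p ∈ primesL, 2 ≤ p) (hb : 1 ≤ base) (hbl : base ≤ limit) :
    ∀ (fuel : Nat) (stack seen : List Int) (count largest : Int),
      seen.Nodup → stack.Nodup → (∀ n ∈ stack, n ∈ seen) →
      (∀ n ∈ seen, Reach primesL base n ∧ n ≤ limit) →
      base ∈ seen →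
      (∀ n ∈ seen, n ∉ stack → ∀ p ∈ primesL, n * p ≤ limit → n * p ∈ seen) →
      count = (seen.length : Int) - (stack.length : Int) →
      largest ∈ seen →
      (∀ n ∈ seen, n ∉ stack → n ≤ largest) →
      limit.toNat + 1 ≤ fuel + (seen.length - stack.length) →
      ∃ (L : List Int) (m : Int),
        L.Nodup ∧ (∀ n, n ∈ L ↔ Reach primesL base n ∧ n ≤ limit) ∧
        m ∈ L ∧ (∀ n ∈ L, n ≤ m) ∧
        aLoop primesL limit fuel stack seen count largest = [(L.length : Int), m] := by
  have final : ∀ (fuel : Nat) (seen : List Int) (count largest : Int),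
      seen.Nodup →
      (∀ n ∈ seen, Reach primesL base n ∧ n ≤ limit) →
      base ∈ seen →
      (∀ n ∈ seen, ∀ p ∈ primesL, n * p ≤ limit → n * p ∈ seen) →
      count = (seen.length : Int) →
      largest ∈ seen →
      (∀ n ∈ seen, n ≤ largest) →
      ∃ (L : List Int) (m : Int),
        L.Nodup ∧ (∀ n, n ∈ L ↔ Reach primesL base n ∧ n ≤ limit) ∧
        m ∈ L ∧ (∀ n ∈ L, n ≤ m) ∧
        aLoop primesL limit fuel [] seen count largest = [(L.length : Int), m] := by
    intro fuel seen count largest hndS hreach hbase hclosed hcount hlmem hlmax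
    refine ⟨seen, largest, hndS, ?_, hlmem, hlmax, ?_⟩
    · intro n
      refine ⟨hreach n, ?_⟩
      rintro ⟨hr, hle⟩
      induction hr with
      | base => exact hbase
      | @mul y q hy hq ih =>
        have h1y : 1 ≤ y := reach_one_le hp hb hy
        have hq2 : 2 ≤ q := hp q hq
        have hyle : y ≤ limit := by nlinarith
        exact hclosed y (ih hyle) q hq hle
    · rw [aLoop, hcount]
  intro fuel
  induction fuel with
  | zero =>
    intro stack seen count largest hndS hndK hsub hreach hbase hclosed hcount hlmem hlmax hfuel
    cases stack with
    | nil =>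
      exact final 0 seen count largest hndS hreach hbase
        (fun n hn => hclosed n hn (List.not_mem_nil (a := n)))
        (by rw [hcount]; simp) hlmem
        (fun n hn => hlmax n hn (List.not_mem_nil (a := n)))
    | cons s ss =>
      exfalso
      have hlen_seen : seen.length ≤ limit.toNat :=
        length_le_toNat hndS (fun n hn =>
          ⟨reach_one_le hp hb (hreach n hn).1, (hreach n hn).2⟩)
      have hstle : (s :: ss).length ≤ seen.length :=
        (List.subperm_of_subset hndK hsub).length_le
      simp only [List.length_cons] at hstle
      omega
  | succ f ih =>
    intro stack seen count largest hndS hndK hsub hreach hbase hclosed hcount hlmem hlmax hfuel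
    cases stack with
    | nil =>
      exact final (f + 1) seen count largest hndS hreach hbase
        (fun n hn => hclosed n hn (List.not_mem_nil (a := n)))
        (by rw [hcount]; simp) hlmem
        (fun n hn => hlmax n hn (List.not_mem_nil (a := n)))
    | cons s ss =>
      obtain ⟨rest, x, hsplit⟩ :=
        (List.eq_nil_or_concat (s :: ss)).resolve_left (by simp)
      rw [List.concat_eq_append] at hsplit
      have hpop : PySem.List.pop? (s :: ss) = some (x, rest) := by
        rw [hsplit]; exact PySem.List.pop?_last rest x
      -- facts about the popped element
      have hxstack : x ∈ s :: ss := by rw [hsplit]; simp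
      have hxseen : x ∈ seen := hsub x hxstack
      have hxreach : Reach primesL base x := (hreach x hxseen).1
      have hndrx : (rest ++ [x]).Nodup := hsplit ▸ hndK
      have hndrest : rest.Nodup := (List.nodup_append.mp hndrx).1
      have hxnrest : x ∉ rest := by
        intro hxr
        have := List.nodup_append.mp hndrx
        exact this.2.2 x hxr x (by simp) rfl
      have hrest_sub : ∀ n ∈ rest, n ∈ seen := fun n hn =>
        hsub n (by rw [hsplit]; exact List.mem_append_left _ hn)
      -- the inner for-loop
      obtain ⟨F1, F2, F3, F4⟩ := aStep_fold limit x primesL (rest, seen)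
      obtain ⟨Fsub, Fnd1, Fnd2⟩ := F3 hrest_sub hndrest hndS
      set st := primesL.foldl (aStep limit x) (rest, seen) with hst
      have F4' : st.1.length + seen.length = st.2.length + rest.length := F4
      have hlen : (s :: ss).length = rest.length + 1 := by rw [hsplit]; simp
      have hstle : (s :: ss).length ≤ seen.length :=
        (List.subperm_of_subset hndK hsub).length_le
      -- every element of the new seen that is not on the new stack is in the old seen
      have hold : ∀ n, n ∈ st.2 → n ∉ st.1 → n ∈ seen ∧ n ∉ rest := by
        intro n hn hnst
        constructor
        · by_contra hns
          exact hnst ((F2 n).mpr (Or.inr ⟨hn, hns⟩))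
        · exact fun h => hnst ((F2 n).mpr (Or.inl h))
      have hlargest' : largest ≤ (if x > largest then x else largest) ∧
          (if x > largest then x else largest) ∈ seen ∧
          x ≤ (if x > largest then x else largest) := by
        split <;> refine ⟨by omega, ?_, by omega⟩ <;> assumption
      -- apply the induction hypothesis to the new state
      have hmain := ih st.1 st.2 (count + 1) (if x > largest then x else largest)
        Fnd2 Fnd1 Fsub
        (by
          intro n hn
          rcases (F1 n).mp hn with h | ⟨q, hq, rfl, hle⟩
          · exact hreach n h
          · exact ⟨Reach.mul hxreach hq, hle⟩)
        ((F1 base).mpr (Or.inl hbase))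
        (by
          intro n hn hnst p hpm hle
          obtain ⟨hnseen, hnrest⟩ := hold n hn hnst
          by_cases hnx : n = x
          · subst hnx
            exact (F1 _).mpr (Or.inr ⟨p, hpm, rfl, hle⟩)
          · have hnstack0 : n ∉ s :: ss := by
              rw [hsplit]; simp [hnrest, hnx]
            exact (F1 _).mpr (Or.inl (hclosed n hnseen hnstack0 p hpm hle)))
        (by
          rw [hcount]
          omega)
        ((F1 _).mpr (Or.inl hlargest'.2.1))
        (by
          intro n hn hnst
          obtain ⟨hnseen, hnrest⟩ := hold n hn hnst
          by_cases hnx : n = x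
          · subst hnx; exact hlargest'.2.2
          · have hnstack0 : n ∉ s :: ss := by
              rw [hsplit]; simp [hnrest, hnx]
            exact le_trans (hlmax n hnseen hnstack0) hlargest'.1)
        (by
          have hst1le : st.1.length ≤ st.2.length :=
            (List.subperm_of_subset Fnd1 Fsub).length_le
          omega)
      obtain ⟨L, m, hLnd, hLmem, hmL, hmax, heq⟩ := hmain
      refine ⟨L, m, hLnd, hLmem, hmL, hmax, ?_⟩
      rw [aLoop, hpop]
      exact heq

-- ---- B-side: brec/bloop compute the generated set ----

theorem brec_spec (limit : Int) :
    ∀ l : List Int, (∀ p ∈ l, 2 ≤ p) →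
      ∀ (v : Int) (res : List Int), 1 ≤ v → v ≤ limit → res.Nodup →
        (brec limit l v res).Nodup ∧
        ∀ n, n ∈ brec limit l v res ↔ n ∈ res ∨ (GenMem l v n ∧ n ≤ limit) := by
  intro l
  induction l with
  | nil =>
    intro _ v res hv hvl hnd
    constructor
    · rw [brec]; exact PySem.Set.nodup_add _ _ hnd
    intro n
    rw [brec, PySem.Set.mem_add]
    unfold GenMem
    constructor
    · rintro (h | rfl)
      · exact Or.inl h
      · exact Or.inr ⟨rfl, hvl⟩
    · rintro (h | ⟨rfl, _⟩)
      · exact Or.inl h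
      · exact Or.inr rfl
  | cons p ps ih =>
    intro hl v res hv hvl hnd
    have hp : 2 ≤ p := hl p (List.mem_cons_self ..)
    have hps : ∀ q ∈ ps, 2 ≤ q := fun q hq => hl q (List.mem_cons_of_mem _ hq)
    -- no product of further powers fits under the limit once cur exceeds it
    have hdead : ∀ (cur n : Int), 1 ≤ cur → limit < cur →
        ¬ ((∃ k : Nat, GenMem ps (cur * p ^ k) n) ∧ n ≤ limit) := by
      rintro cur n hc hlt ⟨⟨k, hk⟩, hnl⟩
      have hpow : (1 : Int) ≤ p ^ k := one_le_pow₀ (by omega)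
      have hc' : 1 ≤ cur * p ^ k := by nlinarith
      have := (genmem_le hk hps hc').1
      nlinarith
    have key : ∀ (fuel : Nat) (cur : Int) (res : List Int), 1 ≤ cur →
        limit < cur * 2 ^ fuel → res.Nodup →
        (bloop limit p ps fuel cur res).Nodup ∧
        ∀ n, n ∈ bloop limit p ps fuel cur res ↔
          n ∈ res ∨ ((∃ k : Nat, GenMem ps (cur * p ^ k) n) ∧ n ≤ limit) := by
      intro fuel
      induction fuel with
      | zero =>
        intro cur res hc hlt hnd
        rw [pow_zero, mul_one] at hlt
        refine ⟨by rw [bloop]; exact hnd, fun n => ?_⟩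
        rw [bloop]
        exact ⟨Or.inl, fun h => h.resolve_right (hdead cur n hc hlt)⟩
      | succ f ihf =>
        intro cur res hc hlt hnd
        by_cases hcl : cur ≤ limit
        · rw [bloop, if_pos ⟨by omega, hcl⟩]
          obtain ⟨hnd', hmem'⟩ := ih hps cur res hc hcl hnd
          have hcp : 1 ≤ cur * p := by nlinarith
          have hlt' : limit < cur * p * 2 ^ f := by
            have h2 : (0 : Int) < 2 ^ f := by positivity
            have hcf : (0 : Int) ≤ cur * 2 ^ f := by nlinarith
            have hle : cur * 2 ^ (f + 1) ≤ cur * p * 2 ^ f := by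
              calc cur * 2 ^ (f + 1) = cur * 2 ^ f * 2 := by rw [pow_succ]; ring
                _ ≤ cur * 2 ^ f * p := by nlinarith
                _ = cur * p * 2 ^ f := by ring
            linarith
          obtain ⟨hnd'', hmem''⟩ := ihf (cur * p) _ hcp hlt' hnd'
          refine ⟨hnd'', fun n => ?_⟩
          rw [hmem'' n, hmem' n]
          constructor
          · rintro ((h | ⟨hg, hle⟩) | ⟨⟨k, hk⟩, hle⟩)
            · exact Or.inl h
            · exact Or.inr ⟨⟨0, by simpa using hg⟩, hle⟩
            · refine Or.inr ⟨⟨k + 1, ?_⟩, hle⟩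
              rwa [pow_succ', ← mul_assoc]
          · rintro (h | ⟨⟨k, hk⟩, hle⟩)
            · exact Or.inl (Or.inl h)
            · cases k with
              | zero => exact Or.inl (Or.inr ⟨by simpa using hk, hle⟩)
              | succ k =>
                refine Or.inr ⟨⟨k, ?_⟩, hle⟩
                rwa [pow_succ', ← mul_assoc] at hk
        · rw [bloop, if_neg (fun h => hcl h.2)]
          rw [not_le] at hcl
          refine ⟨hnd, fun n => ?_⟩
          exact ⟨Or.inl, fun h => h.resolve_right (hdead cur n hc hcl)⟩
    have h2 : limit < v * 2 ^ (limit.toNat + 1) := by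
      have h1 : (limit.toNat : Int) < 2 ^ (limit.toNat + 1) := by
        have := Nat.lt_two_pow_self (n := limit.toNat)
        have h2' : limit.toNat < 2 ^ (limit.toNat + 1) := by
          calc limit.toNat < 2 ^ limit.toNat := this
            _ ≤ 2 ^ (limit.toNat + 1) := Nat.pow_le_pow_right (by omega) (by omega)
        exact_mod_cast h2'
      have h3 : limit ≤ (limit.toNat : Int) := Int.self_le_toNat limit
      have hpow : (0 : Int) < 2 ^ (limit.toNat + 1) := by positivity
      nlinarith
    obtain ⟨hnd', hmem'⟩ := key (limit.toNat + 1) v res hv h2 hnd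
    refine ⟨by rw [brec]; exact hnd', fun n => ?_⟩
    rw [brec, hmem' n]
    simp only [GenMem]

-- ===== VERDICT (by name: the statement is the Claim_ definition above) =====
theorem count_find_num_spec : Claim_equal_count_find_num := by
  unfold Claim_equal_count_find_num
  intro primesL limit _ hpre
  unfold Spec_count_find_num count_find_num count_find_num_alt pyProd
  dsimp only
  split_ifs with hf
  · rfl
  · rw [not_lt] at hf
    have hp : ∀ p ∈ primesL, 2 ≤ p := by
      rcases hpre with h | h
      · rw [List.prod_eq_foldl] at h; omega
      · exact h
    set base := primesL.foldl (· * ·) 1 with hbase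
    have hb : 1 ≤ base := one_le_foldl_prod hp 1 le_rfl
    have hofl : PySem.Set.ofList [base] = [base] :=
      PySem.Set.ofList_eq_self_of_nodup _ (List.nodup_singleton _)
    rw [hofl]
    obtain ⟨L, m, hLnd, hLmem, hmL, hmax, hAeq⟩ :=
      aLoop_spec primesL limit base hp hb hf (limit.toNat + 1) [base] [base] 0 base
        (List.nodup_singleton _) (List.nodup_singleton _) (fun n hn => hn)
        (by intro n hn; rw [List.mem_singleton] at hn; subst hn; exact ⟨Reach.base, hf⟩)
        (List.mem_singleton_self _)
        (fun n hn hnn => absurd hn hnn)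
        (by simp)
        (List.mem_singleton_self _)
        (fun n hn hnn => absurd hn hnn)
        (by simp)
    rw [hAeq]
    set primes := PySem.List.sorted (PySem.Set.ofList primesL) (fun x => x) with hprimes
    have hmemp : ∀ p, p ∈ primes ↔ p ∈ primesL := by
      intro p; rw [hprimes, PySem.List.mem_sorted, PySem.Set.mem_ofList]
    have hpp : ∀ p ∈ primes, 2 ≤ p := fun p hp' => hp p ((hmemp p).mp hp')
    obtain ⟨hRnd, hRmem⟩ := brec_spec limit primes hpp base PySem.Set.empty hb hf List.nodup_nil
    set results := brec limit primes base PySem.Set.empty with hres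
    have hmemres : ∀ n, n ∈ results ↔ n ∈ L := by
      intro n
      rw [hRmem n, hLmem n]
      simp only [PySem.Set.empty, List.not_mem_nil, false_or]
      rw [genmem_iff_reach hmemp]
    have hperm : results.Perm L := (List.perm_ext_iff_of_nodup hRnd hLnd).mpr hmemres
    have hlen : results.length = L.length := hperm.length_eq
    have hbaseres : base ∈ results := (hRmem base).mpr (Or.inr ⟨genmem_refl _ _, hf⟩)
    obtain ⟨m', hm'⟩ : ∃ m', PySem.List.max? results (fun y => y) = some m' := by
      cases hmx : PySem.List.max? results (fun y => y) with
      | none =>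
        rw [PySem.List.max?_eq_none_iff] at hmx
        rw [hmx] at hbaseres
        exact absurd hbaseres (List.not_mem_nil (a := base))
      | some m' => exact ⟨m', rfl⟩
    have hm'mem : m' ∈ results := PySem.List.max?_mem hm'
    have hm'max : ∀ y ∈ results, y ≤ m' := PySem.List.max?_isMax hm'
    have hmm : m = m' := le_antisymm (hm'max m ((hmemres m).mpr hmL))
      (hmax m' ((hmemres m').mp hm'mem))
    rw [hm']
    simp [PySem.Set.len, hlen, hmm]
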